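-- pv_equiv track=rewrite | github.com/simplyziannn/psa_team_mediocre | Problem Statement 3 - Redefining Level 2 Product Ops/code/processing_folder/doc_scan/docx_scanner copy.py | _infer_preferred_families_from_query
-- ===== SOURCE A (Python) =====
-- from typing import List, Tuple, Iterable, Dict, Optional, Any
--
-- def _infer_preferred_families_from_query(q: str) -> List[str]:
--     ql = q.lower()
--     prefs: List[str] = []
--     if any(w in ql for w in ["container", "cntr", "equipment"]): prefs.append("CNTR")
--     if any(w in ql for w in ["vessel", "voyage", "etb", "eta", "baplie", "coprar"]): prefs.append("VSL")
--     if any(w in ql for w in ["api", "webhook", "oauth", "token"]): prefs.append("API")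
--     if any(w in ql for w in ["edi", "edifact", "ansi x12", "iftsta", "coarri", "315", "301", "214"]): prefs.append("EDI")
--     seen, out = set(), []
--     for p in prefs:
--         if p not in seen:
--             out.append(p); seen.add(p)
--     return out
-- ===== SOURCE B (Python) =====
-- _KW2TAG = {
--     "container": "CNTR", "cntr": "CNTR", "equipment": "CNTR",
--     "vessel": "VSL", "voyage": "VSL", "etb": "VSL", "eta": "VSL",
--     "baplie": "VSL", "coprar": "VSL",
--     "api": "API", "webhook": "API", "oauth": "API", "token": "API",
--     "edi": "EDI", "edifact": "EDI", "ansi x12": "EDI", "iftsta": "EDI",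
--     "coarri": "EDI", "315": "EDI", "301": "EDI", "214": "EDI",
-- }
--
-- _TAG_ORDER = ("CNTR", "VSL", "API", "EDI")
--
-- def _infer_preferred_families_from_query(q: str):
--     # Single positional scan: at each index of the lowercased query, test which
--     # keyword starts there (flat keyword->tag map), collecting the matched tags
--     # into a set; then emit the found tags in the fixed canonical order.
--     ql = q.lower()
--     found = set()
--     for i in range(len(ql)):
--         for w, tag in _KW2TAG.items():
--             if ql.startswith(w, i):
--                 found.add(tag)
--     return [t for t in _TAG_ORDER if t in found]
-- ===== Notes on version B (the rewrite author's own statement) =====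
-- stated objective: alternative
-- what changed: Replaces four per-tag any-substring checks plus a dedup loop by a single positional scan of the lowercased query that matches a flat keyword-to-tag map at each index, accumulating found tags in a set and finally emitting them in the fixed canonical tag order.
import Mathlib
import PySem

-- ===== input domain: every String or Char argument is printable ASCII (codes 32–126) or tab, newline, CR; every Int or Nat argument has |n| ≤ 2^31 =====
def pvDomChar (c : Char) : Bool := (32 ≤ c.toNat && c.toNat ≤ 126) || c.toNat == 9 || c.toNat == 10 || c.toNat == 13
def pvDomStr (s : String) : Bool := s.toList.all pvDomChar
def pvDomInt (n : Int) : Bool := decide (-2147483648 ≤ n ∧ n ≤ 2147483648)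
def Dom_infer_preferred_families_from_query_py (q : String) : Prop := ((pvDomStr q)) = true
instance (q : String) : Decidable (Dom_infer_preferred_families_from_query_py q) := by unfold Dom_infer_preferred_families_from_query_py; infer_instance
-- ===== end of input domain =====

-- ===== PORT A =====
def infer_preferred_families_from_query_py (q : String) : List String :=
  let ql := PySem.Str.lower q
  let prefs : List String := []
  let prefs := if ["container", "cntr", "equipment"].any (fun w => PySem.Str.isIn w ql) then prefs ++ ["CNTR"] else prefs
  let prefs := if ["vessel", "voyage", "etb", "eta", "baplie", "coprar"].any (fun w => PySem.Str.isIn w ql) then prefs ++ ["VSL"] else prefs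
  let prefs := if ["api", "webhook", "oauth", "token"].any (fun w => PySem.Str.isIn w ql) then prefs ++ ["API"] else prefs
  let prefs := if ["edi", "edifact", "ansi x12", "iftsta", "coarri", "315", "301", "214"].any (fun w => PySem.Str.isIn w ql) then prefs ++ ["EDI"] else prefs
  let res := prefs.foldl (fun (st : PySem.Set String × List String) p =>
      if !(PySem.Set.contains st.1 p) then (st.2 ++ [p], PySem.Set.add st.1 p).swap else st)
    (PySem.Set.empty, [])
  res.2

-- B: a single positional scan of the lowercased query matching a flat keyword->tag map at each
-- index, collecting found tags into a set and emitting them in the fixed canonical order (alternative).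
-- ===== PORT B =====
def pvKwTable : List (String × String) :=
  [("container", "CNTR"), ("cntr", "CNTR"), ("equipment", "CNTR"),
   ("vessel", "VSL"), ("voyage", "VSL"), ("etb", "VSL"), ("eta", "VSL"),
   ("baplie", "VSL"), ("coprar", "VSL"),
   ("api", "API"), ("webhook", "API"), ("oauth", "API"), ("token", "API"),
   ("edi", "EDI"), ("edifact", "EDI"), ("ansi x12", "EDI"), ("iftsta", "EDI"),
   ("coarri", "EDI"), ("315", "EDI"), ("301", "EDI"), ("214", "EDI")]

def pvTagOrder : List String := ["CNTR", "VSL", "API", "EDI"]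

def infer_preferred_families_from_query_py_alt (q : String) : List String :=
  let cs := (PySem.Str.lower q).toList
  -- Python's ql.startswith(w, i) is exactly 'w.toList is a prefix of cs.drop i' for 0 ≤ i ≤ len
  let found : PySem.Set String := (List.range cs.length).foldl
    (fun s i => pvKwTable.foldl
      (fun s wt => if PySem.Chars.startswith (cs.drop i) wt.1.toList then PySem.Set.add s wt.2 else s) s)
    PySem.Set.empty
  pvTagOrder.filter (fun t => PySem.Set.contains found t)

-- ===== PRECONDITION & SPEC =====
def Spec_infer_preferred_families_from_query_py (q : String) (out : List String) : Prop := out = infer_preferred_families_from_query_py_alt q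
instance (q : String) (out : List String) : Decidable (Spec_infer_preferred_families_from_query_py q out) := by unfold Spec_infer_preferred_families_from_query_py; infer_instance

-- ===== CLAIM =====
def Claim_equal_infer_preferred_families_from_query_py : Prop := ∀ (q : String), Dom_infer_preferred_families_from_query_py q → Spec_infer_preferred_families_from_query_py q (infer_preferred_families_from_query_py q)

-- ===== LEMMAS AND PROOFS =====

-- membership in the inner fold over a keyword table
theorem pv_inner_mem (cs : List Char) (i : Nat) (T : List (String × String))
    (s : PySem.Set String) (tag : String) :
    tag ∈ T.foldl
      (fun s wt => if PySem.Chars.startswith (cs.drop i) wt.1.toList then PySem.Set.add s wt.2 else s) s ↔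
    tag ∈ s ∨ ∃ wt ∈ T, PySem.Chars.startswith (cs.drop i) wt.1.toList = true ∧ wt.2 = tag := by
  induction T generalizing s with
  | nil => simp
  | cons wt T ih =>
    simp only [List.foldl_cons, ih, List.mem_cons]
    by_cases h : PySem.Chars.startswith (cs.drop i) wt.1.toList = true
    · simp [h, PySem.Set.mem_add]; tauto
    · simp only [if_neg h]
      constructor
      · rintro (hs | ⟨w, hw, hp, he⟩)
        · exact Or.inl hs
        · exact Or.inr ⟨w, Or.inr hw, hp, he⟩
      · rintro (hs | ⟨w, (rfl | hw), hp, he⟩)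
        · exact Or.inl hs
        · exact absurd hp h
        · exact Or.inr ⟨w, hw, hp, he⟩

-- membership in the outer fold over the scanned positions
theorem pv_outer_mem (cs : List Char) (L : List Nat) (s : PySem.Set String) (tag : String) :
    tag ∈ L.foldl
      (fun s i => pvKwTable.foldl
        (fun s wt => if PySem.Chars.startswith (cs.drop i) wt.1.toList then PySem.Set.add s wt.2 else s) s) s ↔
    tag ∈ s ∨ ∃ i ∈ L, ∃ wt ∈ pvKwTable, PySem.Chars.startswith (cs.drop i) wt.1.toList = true ∧ wt.2 = tag := by
  induction L generalizing s with
  | nil => simp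
  | cons j L ih =>
    simp only [List.foldl_cons, ih, pv_inner_mem, List.mem_cons]
    constructor
    · rintro ((hs | ⟨wt, hwt, hp, he⟩) | ⟨i, hi, hrest⟩)
      · exact Or.inl hs
      · exact Or.inr ⟨j, Or.inl rfl, wt, hwt, hp, he⟩
      · exact Or.inr ⟨i, Or.inr hi, hrest⟩
    · rintro (hs | ⟨i, (rfl | hi), hrest⟩)
      · exact Or.inl (Or.inl hs)
      · exact Or.inl (Or.inr hrest)
      · exact Or.inr ⟨i, hi, hrest⟩

-- a nonempty keyword matches at some scanned position iff it is a substring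
theorem pv_ex_drop (ql w : String) (hw : w.toList ≠ []) :
    (∃ i ∈ List.range ql.toList.length,
        PySem.Chars.startswith (ql.toList.drop i) w.toList = true) ↔
    PySem.Str.isIn w ql = true := by
  rw [PySem.Str.isIn_iff_infix]
  constructor
  · rintro ⟨i, _, h⟩
    exact List.IsInfix.trans ((PySem.Chars.startswith_iff _ _).1 h).isInfix (List.drop_suffix _ _).isInfix
  · intro h
    have h2 : (∃ j, w.toList <+: ql.toList.drop j) := by
      rw [PySem.Chars.exists_prefix_drop_iff_isIn, PySem.Chars.isIn_iff_infix]; exact h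
    obtain ⟨j, hj⟩ := h2
    by_cases hlt : j < ql.toList.length
    · exact ⟨j, List.mem_range.2 hlt, (PySem.Chars.startswith_iff _ _).2 hj⟩
    · exfalso
      rw [List.drop_eq_nil_of_le (Nat.le_of_not_lt hlt)] at hj
      exact hw (List.prefix_nil.1 hj)

-- the scan found a tag iff some of its keywords is a substring of the query
theorem pv_family_char (ql : String) (tag : String) (kws : List String)
    (hne : ∀ w ∈ kws, w.toList ≠ [])
    (h1 : ∀ w ∈ kws, (w, tag) ∈ pvKwTable)
    (h2 : ∀ wt ∈ pvKwTable, wt.2 = tag → wt.1 ∈ kws) :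
    (∃ i ∈ List.range ql.toList.length, ∃ wt ∈ pvKwTable,
        PySem.Chars.startswith (ql.toList.drop i) wt.1.toList = true ∧ wt.2 = tag) ↔
    kws.any (fun w => PySem.Str.isIn w ql) = true := by
  rw [List.any_eq_true]
  constructor
  · rintro ⟨i, hi, wt, hwt, hp, he⟩
    exact ⟨wt.1, h2 wt hwt he, (pv_ex_drop ql wt.1 (hne _ (h2 wt hwt he))).1 ⟨i, hi, hp⟩⟩
  · rintro ⟨w, hw, hin⟩
    obtain ⟨i, hi, hp⟩ := (pv_ex_drop ql w (hne w hw)).2 hin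
    exact ⟨i, hi, (w, tag), h1 w hw, hp, rfl⟩

theorem pv_contains_eq (ql : String) (tag : String) (kws : List String)
    (hne : ∀ w ∈ kws, w.toList ≠ [])
    (h1 : ∀ w ∈ kws, (w, tag) ∈ pvKwTable)
    (h2 : ∀ wt ∈ pvKwTable, wt.2 = tag → wt.1 ∈ kws) :
    PySem.Set.contains
      ((List.range ql.toList.length).foldl
        (fun s i => pvKwTable.foldl
          (fun s wt => if PySem.Chars.startswith (ql.toList.drop i) wt.1.toList then PySem.Set.add s wt.2 else s) s)
        PySem.Set.empty) tag
    = kws.any (fun w => PySem.Str.isIn w ql) := by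
  rw [Bool.eq_iff_iff, PySem.Set.contains_iff, pv_outer_mem,
      ← pv_family_char ql tag kws hne h1 h2]
  simp [PySem.Set.empty]

-- ===== VERDICT =====
theorem infer_preferred_families_from_query_py_spec : Claim_equal_infer_preferred_families_from_query_py := by
  intro q _
  unfold Spec_infer_preferred_families_from_query_py
  unfold infer_preferred_families_from_query_py infer_preferred_families_from_query_py_alt
  have hC := pv_contains_eq (PySem.Str.lower q) "CNTR" ["container", "cntr", "equipment"]
    (by decide) (by decide) (by decide)
  have hV := pv_contains_eq (PySem.Str.lower q) "VSL" ["vessel", "voyage", "etb", "eta", "baplie", "coprar"]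
    (by decide) (by decide) (by decide)
  have hA := pv_contains_eq (PySem.Str.lower q) "API" ["api", "webhook", "oauth", "token"]
    (by decide) (by decide) (by decide)
  have hE := pv_contains_eq (PySem.Str.lower q) "EDI" ["edi", "edifact", "ansi x12", "iftsta", "coarri", "315", "301", "214"]
    (by decide) (by decide) (by decide)
  simp only [pvTagOrder, List.filter_cons, List.filter_nil, hC, hV, hA, hE]
  generalize (["container", "cntr", "equipment"].any (fun w => PySem.Str.isIn w (PySem.Str.lower q))) = b1
  generalize (["vessel", "voyage", "etb", "eta", "baplie", "coprar"].any (fun w => PySem.Str.isIn w (PySem.Str.lower q))) = b2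
  generalize (["api", "webhook", "oauth", "token"].any (fun w => PySem.Str.isIn w (PySem.Str.lower q))) = b3
  generalize (["edi", "edifact", "ansi x12", "iftsta", "coarri", "315", "301", "214"].any (fun w => PySem.Str.isIn w (PySem.Str.lower q))) = b4
  cases b1 <;> cases b2 <;> cases b3 <;> cases b4 <;> rfl
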